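-- pv_equiv track=rewrite | github.com/RechesP/OntarioTechProjects | CSCI 1030U/Exam/Exam_prep/Practice_Exam_1/practice_sentence.py | process_sentence
-- ===== SOURCE A (Python) =====
-- def get_word_size(word, count = 0):
--     if word == "":
--         return count
--     count += 1
--     return get_word_size(word[1:], count)
--
-- def process_word(string):
--     return get_word_size(string)
--
-- def process_sentence(sentence):
--     list = []
--     word = ''
--     count = 0
--     for i in range(0,len(sentence) + 1):
--         if i > len(sentence)-1 or sentence[i] == ' ':
--             list.append(process_word(word))
--             word = ''
--         elif  sentence[i] == '-' or sentence[i] == '.' or sentence[i] == ',' or sentence[i] == ';' or sentence[i] == ':' or sentence[i] == '!' or sentence[i] == '?':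
--             pass
--         elif sentence[i] != ' ':
--             word += sentence[i]
--     return list
-- ===== SOURCE B (Python) =====
-- PUNCT = '-.,;:!?'
--
-- def process_sentence(sentence):
--     words = sentence.split(' ')
--     result = []
--     for w in words:
--         n = 0
--         for ch in w:
--             if ch not in PUNCT:
--                 n += 1
--         result.append(n)
--     return result
-- ===== Notes on version B (the rewrite author's own statement) =====
-- stated objective: simpler
-- what changed: Replaces A's fused index loop with len+1 sentinel, character-accumulator word and recursive length helper by a split-on-space pass followed by a per-word non-punctuation count.
import Mathlib
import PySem

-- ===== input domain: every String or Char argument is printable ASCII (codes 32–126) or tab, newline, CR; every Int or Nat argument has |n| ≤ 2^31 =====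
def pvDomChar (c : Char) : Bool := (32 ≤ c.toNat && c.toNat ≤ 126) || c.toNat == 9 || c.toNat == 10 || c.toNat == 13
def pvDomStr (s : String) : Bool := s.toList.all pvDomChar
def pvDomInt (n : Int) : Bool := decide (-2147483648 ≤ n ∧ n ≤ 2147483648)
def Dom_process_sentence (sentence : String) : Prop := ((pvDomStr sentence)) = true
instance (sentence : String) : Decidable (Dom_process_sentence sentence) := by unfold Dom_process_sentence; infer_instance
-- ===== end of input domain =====

-- B replaces A's fused index loop (len+1 sentinel, accumulator word, recursive length) by split-on-' ' then a per-word non-punctuation count; simpler.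

-- ===== PORT A =====
-- get_word_size(word, count=0): recursion on word[1:]
def gws : List Char → Int → Int
  | [], count => count
  | _ :: t, count => gws t (count + 1)

-- process_word(string) = get_word_size(string)
def process_word (string : List Char) : Int := gws string 0

-- loop body of A: state = (list, word); sentence[i] in the elif branches is in range, so pyGetD is exact there
def stepA (cs : List Char) (st : List Int × List Char) (i : Int) : List Int × List Char :=
  if i > PySem.List.len cs - 1 then (st.1 ++ [process_word st.2], [])
  else
    let c := PySem.List.pyGetD cs i ' '
    if c = ' ' then (st.1 ++ [process_word st.2], [])
    else if c = '-' ∨ c = '.' ∨ c = ',' ∨ c = ';' ∨ c = ':' ∨ c = '!' ∨ c = '?' then st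
    else (st.1, st.2 ++ [c])

def process_sentence (sentence : String) : List Int :=
  ((PySem.List.pyRange 0 (PySem.List.len sentence.toList + 1) 1).foldl
    (stepA sentence.toList) ([], [])).1

-- ===== PORT B =====
-- hand port of str.split(' ') on code points: split at every single space, keeping empty segments ('' gives ['']); exact for a one-char separator
def splitSp : List Char → List (List Char)
  | [] => [[]]
  | c :: t =>
    if c = ' ' then [] :: splitSp t
    else
      match splitSp t with
      | p :: ps => (c :: p) :: ps
      | [] => [[c]]

-- inner loop of B: n += 1 for every ch not in PUNCT
def cntB (w : List Char) : Int :=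
  w.foldl (fun n ch => if ['-', '.', ',', ';', ':', '!', '?'].contains ch then n else n + 1) 0

def process_sentence_alt (sentence : String) : List Int :=
  (splitSp sentence.toList).foldl (fun result w => result ++ [cntB w]) []

-- ===== PRECONDITION & SPEC =====
def Spec_process_sentence (sentence : String) (out : List Int) : Prop := out = process_sentence_alt sentence
instance (sentence : String) (out : List Int) : Decidable (Spec_process_sentence sentence out) := by unfold Spec_process_sentence; infer_instance

-- ===== CLAIM (what is proved, stated in full; the proofs are below) =====
def Claim_equal_process_sentence : Prop := ∀ (sentence : String), Dom_process_sentence sentence → Spec_process_sentence sentence (process_sentence sentence)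

-- ===== LEMMAS AND PROOFS =====

theorem gws_eq (w : List Char) : ∀ k : Int, gws w k = k + (w.length : Int) := by
  induction w with
  | nil => intro k; simp [gws]
  | cons c t ih => intro k; simp [gws, ih]; ring

-- A's loop body with the index guard removed (valid on in-range indices)
def stepC (st : List Int × List Char) (c : Char) : List Int × List Char :=
  if c = ' ' then (st.1 ++ [process_word st.2], [])
  else if c = '-' ∨ c = '.' ∨ c = ',' ∨ c = ';' ∨ c = ':' ∨ c = '!' ∨ c = '?' then st
  else (st.1, st.2 ++ [c])

theorem cntB_shift (w : List Char) : ∀ n : Int,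
    w.foldl (fun n ch => if ['-', '.', ',', ';', ':', '!', '?'].contains ch then n else n + 1) n
      = n + cntB w := by
  induction w with
  | nil => intro n; simp [cntB]
  | cons c t ih =>
    intro n
    simp only [cntB, List.foldl_cons] at *
    rw [ih (if ['-', '.', ',', ';', ':', '!', '?'].contains c then n else n + 1),
        ih (if ['-', '.', ',', ';', ':', '!', '?'].contains c then 0 else 0 + 1)]
    by_cases hc : ['-', '.', ',', ';', ':', '!', '?'].contains c = true
    · rw [if_pos hc, if_pos hc]; ring
    · rw [if_neg hc, if_neg hc]; ring

theorem cntB_cons (c : Char) (p : List Char) :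
    cntB (c :: p) = (if ['-', '.', ',', ';', ':', '!', '?'].contains c then 0 else 1) + cntB p := by
  show (c :: p).foldl
      (fun n ch => if ['-', '.', ',', ';', ':', '!', '?'].contains ch then n else n + 1) 0 = _
  rw [List.foldl_cons, cntB_shift]
  norm_num

theorem splitSp_ne_nil (cs : List Char) : splitSp cs ≠ [] := by
  cases cs with
  | nil => simp [splitSp]
  | cons c t =>
    simp only [splitSp]
    split
    · simp
    · split <;> simp

theorem splitSp_cons_ex (t : List Char) : ∃ p ps, splitSp t = p :: ps := by
  cases h : splitSp t with
  | nil => exact absurd h (splitSp_ne_nil t)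
  | cons p ps => exact ⟨p, ps, rfl⟩

theorem punct_contains (c : Char) :
    (['-', '.', ',', ';', ':', '!', '?'].contains c = true)
      ↔ (c = '-' ∨ c = '.' ∨ c = ',' ∨ c = ';' ∨ c = ':' ∨ c = '!' ∨ c = '?') := by
  simp

theorem mainA (cs : List Char) : ∀ (l : List Int) (w : List Char),
    (cs.foldl stepC (l, w)).1 ++ [process_word (cs.foldl stepC (l, w)).2]
      = l ++ ((w.length : Int) + cntB (splitSp cs).head!) :: ((splitSp cs).tail.map cntB) := by
  induction cs with
  | nil =>
    intro l w
    simp only [List.foldl_nil]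
    have hsp0 : splitSp ([] : List Char) = [[]] := rfl
    rw [hsp0, List.head!_cons, List.tail_cons]
    simp [process_word, gws_eq, cntB]
  | cons c t ih =>
    intro l w
    obtain ⟨p, ps, hps⟩ := splitSp_cons_ex t
    by_cases hsp : c = ' '
    · subst hsp
      have hsplit : splitSp (' ' :: t) = [] :: splitSp t := by simp [splitSp]
      simp only [List.foldl_cons, stepC]
      rw [ih, hsplit, hps, List.head!_cons, List.tail_cons]
      have h0 : cntB ([] : List Char) = 0 := rfl
      simp [process_word, gws_eq, h0]
    · have hsplit : splitSp (c :: t) = (c :: p) :: ps := by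
        simp [splitSp, hsp, hps]
      by_cases hp : c = '-' ∨ c = '.' ∨ c = ',' ∨ c = ';' ∨ c = ':' ∨ c = '!' ∨ c = '?'
      · have hc : ['-', '.', ',', ';', ':', '!', '?'].contains c = true := (punct_contains c).mpr hp
        simp only [List.foldl_cons, stepC, if_neg hsp, if_pos hp]
        rw [ih, hps, hsplit, List.head!_cons, List.tail_cons, List.head!_cons, List.tail_cons,
            cntB_cons, if_pos hc]
        norm_num
      · have hc : ¬ (['-', '.', ',', ';', ':', '!', '?'].contains c = true) :=
          fun h => hp ((punct_contains c).mp h)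
        simp only [List.foldl_cons, stepC, if_neg hsp, if_neg hp]
        rw [ih, hps, hsplit, List.head!_cons, List.tail_cons, List.head!_cons, List.tail_cons,
            cntB_cons, if_neg hc]
        have hAB : ((w ++ [c]).length : Int) + cntB p = (w.length : Int) + (1 + cntB p) := by
          have hl : ((w ++ [c]).length : Int) = (w.length : Int) + 1 := by simp
          rw [hl]; ring
        rw [hAB]

theorem stepA_of_mem (cs : List Char) (st : List Int × List Char) (i : Int)
    (hi : i ∈ PySem.List.pyRange 0 (PySem.List.len cs) 1) :
    stepA cs st i = stepC st (PySem.List.pyGetD cs i ' ') := by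
  have h := (PySem.List.mem_pyRange_one).mp hi
  simp only [PySem.List.len_eq] at h
  simp only [stepA, stepC]
  rw [if_neg (by simp only [PySem.List.len_eq]; omega)]

theorem process_sentence_eq (sentence : String) :
    process_sentence sentence
      = (sentence.toList.foldl stepC ([], [])).1
        ++ [process_word (sentence.toList.foldl stepC ([], [])).2] := by
  unfold process_sentence
  have hlen : (0 : Int) ≤ PySem.List.len sentence.toList := by
    simp [PySem.List.len_eq]
  rw [PySem.List.pyRange_one_succ_right hlen, List.foldl_append,
      PySem.List.foldl_congr_mem _ _ (fun st c => stepC st (PySem.List.pyGetD sentence.toList c ' '))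
        _ (fun st i hi => stepA_of_mem sentence.toList st i hi)]
  have hfold := PySem.List.foldl_pyRange_zero_pyGetD' sentence.toList ' ' stepC
      ((([] : List Int), ([] : List Char)))
  simp only [PySem.List.len_eq] at hfold ⊢
  rw [hfold]
  simp only [List.foldl_cons, List.foldl_nil, stepA]
  rw [if_pos (by simp only [PySem.List.len_eq]; omega)]

-- ===== VERDICT (by name: the statement is the Claim_ definition above) =====
theorem process_sentence_spec : Claim_equal_process_sentence := by
  intro sentence _
  unfold Spec_process_sentence process_sentence_alt
  rw [process_sentence_eq, mainA, PySem.List.foldl_append_singleton_eq_map]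
  obtain ⟨p, ps, hps⟩ := splitSp_cons_ex sentence.toList
  rw [hps, List.head!_cons, List.tail_cons]
  norm_num
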